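-- pv_equiv track=rewrite | github.com/nikolayka-from-github/MM_Lr_1 | FTPReaders.py | split_to_f_value
-- ===== SOURCE A (Python) =====
-- def split_to_f_value(line):
--     temp_line = ""
--     arr_line = []
--     temp_srt_value = ""
--     for i in line:
--         temp_line += i
--     counter = 0
--     bool_d = False
--     for i in temp_line:
--         temp_srt_value += i
--         if i == "D":
--             bool_d = True
--             continue
--         if bool_d:
--             counter += 1
--         if counter == 3:
--             arr_line.append(temp_srt_value)
--             temp_srt_value = ""
--             counter = 0
--             bool_d = False
--     return arr_line
-- ===== SOURCE B (Python) =====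
-- def split_to_f_value(line):
--     # Index-based scanner: jump to the next 'D' with str.index, then count off
--     # three non-'D' characters and cut the token out with a slice.
--     s = list(line)
--     out = []
--     rest = s
--     while 'D' in rest:
--         d = rest.index('D')
--         k = d + 1
--         cnt = 0
--         while k < len(rest) and cnt < 3:
--             if rest[k] != 'D':
--                 cnt += 1
--             k += 1
--         if cnt < 3:
--             break
--         out.append(''.join(rest[:k]))
--         rest = rest[k:]
--     return out
-- ===== Notes on version B (the rewrite author's own statement) =====
-- stated objective: faster
-- what changed: Replaces A's char-by-char state machine (accumulator string, counter and bool_d flag) with an index-based scanner that jumps to the next 'D' marker with list.index, counts off three non-marker characters, and slices each token out of the remaining suffix in one join.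
import Mathlib
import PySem

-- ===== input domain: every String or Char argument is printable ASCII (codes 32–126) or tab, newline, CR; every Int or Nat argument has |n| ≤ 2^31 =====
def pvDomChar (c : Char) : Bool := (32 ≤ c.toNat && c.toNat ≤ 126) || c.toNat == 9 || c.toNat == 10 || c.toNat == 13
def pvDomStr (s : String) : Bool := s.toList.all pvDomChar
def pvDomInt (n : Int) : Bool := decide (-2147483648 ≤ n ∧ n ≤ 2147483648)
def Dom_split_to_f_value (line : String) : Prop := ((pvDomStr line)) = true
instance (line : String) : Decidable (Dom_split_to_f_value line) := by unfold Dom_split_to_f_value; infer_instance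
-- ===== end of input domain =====

-- B replaces A's char-by-char state machine (flags + accumulator strings) by an
-- index-based scanner: jump to the next 'D', count off three non-'D' characters,
-- cut the token out with a slice (constant-factor faster: no per-char string appends).

-- ===== PORT A =====
-- loop body of A's second for-loop, acting on state (arr_line, temp_srt_value, counter, bool_d)
def stepA (st : List String × List Char × Nat × Bool) (i : Char) :
    List String × List Char × Nat × Bool :=
  let arr := st.1
  let temp := st.2.1 ++ [i]
  let counter := st.2.2.1
  let boolD := st.2.2.2
  if i = 'D' then (arr, temp, counter, true)   -- continue
  else
    let counter := if boolD then counter + 1 else counter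
    if counter = 3 then (arr ++ [String.mk temp], [], 0, false)
    else (arr, temp, counter, boolD)

def split_to_f_value (line : String) : List String :=
  -- for i in line: temp_line += i
  let temp_line := line.toList.foldl (fun acc i => acc ++ [i]) []
  (temp_line.foldl stepA ([], ([], (0, false)))).1

-- ===== PORT B =====
-- inner while loop: consume chars after the 'D' until 3 non-'D' seen; number consumed (or none)
def altGrab : List Char → Nat → Option Nat
  | [], _ => none
  | c :: cs, cnt =>
    let cnt' := if c = 'D' then cnt else cnt + 1
    if cnt' = 3 then some 1
    else (altGrab cs cnt').map (· + 1)

-- outer while loop over the remaining suffix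
def altLoop (rest : List Char) (out : List String) : List String :=
  if h : 'D' ∈ rest then
    let d := rest.idxOf 'D'
    match altGrab (rest.drop (d + 1)) 0 with
    | none => out
    | some k => altLoop (rest.drop (d + 1 + k)) (out ++ [String.mk (rest.take (d + 1 + k))])
  else out
termination_by rest.length
decreasing_by
  have hne : rest ≠ [] := by rintro rfl; simp at h
  have : 0 < rest.length := List.length_pos_iff.mpr hne
  simp only [List.length_drop]; omega

def split_to_f_value_alt (line : String) : List String :=
  altLoop line.toList []

-- ===== PRECONDITION & SPEC =====
def Spec_split_to_f_value (line : String) (out : List String) : Prop := out = split_to_f_value_alt line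
instance (line : String) (out : List String) : Decidable (Spec_split_to_f_value line out) := by unfold Spec_split_to_f_value; infer_instance

-- ===== CLAIM (what is proved, stated in full; the proofs are below) =====
def Claim_equal_split_to_f_value : Prop := ∀ (line : String), Dom_split_to_f_value line → Spec_split_to_f_value line (split_to_f_value line)

-- ===== LEMMAS AND PROOFS =====

theorem foldl_copy (l acc : List Char) :
    List.foldl (fun acc i => acc ++ [i]) acc l = acc ++ l := by
  induction l generalizing acc with
  | nil => simp
  | cons c cs ih => simp [List.foldl_cons, ih]

theorem foldA_noD (cs : List Char) (arr : List String) (temp : List Char)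
    (h : 'D' ∉ cs) :
    List.foldl stepA (arr, temp, 0, false) cs = (arr, temp ++ cs, 0, false) := by
  induction cs generalizing temp with
  | nil => simp
  | cons c cs ih =>
    have hc : c ≠ 'D' := fun hc => h (hc ▸ List.mem_cons_self)
    have h' : 'D' ∉ cs := fun hm => h (List.mem_cons_of_mem _ hm)
    rw [List.foldl_cons,
      show stepA (arr, temp, 0, false) c = (arr, temp ++ [c], 0, false) by simp [stepA, hc],
      ih _ h']
    simp

theorem foldA_grab_none (cs : List Char) :
    ∀ (cnt : Nat) (arr : List String) (temp : List Char), cnt < 3 → altGrab cs cnt = none →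
      (List.foldl stepA (arr, temp, cnt, true) cs).1 = arr := by
  induction cs with
  | nil => intro cnt arr temp _ _; simp
  | cons c cs ih =>
    intro cnt arr temp hcnt hg
    simp only [altGrab] at hg
    by_cases hc : c = 'D'
    · simp only [hc, if_true, if_neg (Nat.ne_of_lt hcnt)] at hg
      have hg' : altGrab cs cnt = none := by
        cases hgg : altGrab cs cnt <;> simp [hgg] at hg ⊢
      rw [List.foldl_cons,
        show stepA (arr, temp, cnt, true) c = (arr, temp ++ [c], cnt, true) by simp [stepA, hc]]
      exact ih cnt arr _ hcnt hg'
    · simp only [hc, if_false] at hg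
      by_cases h3 : cnt + 1 = 3
      · simp [h3] at hg
      · simp only [h3, if_false] at hg
        have hg' : altGrab cs (cnt + 1) = none := by
          cases hgg : altGrab cs (cnt + 1) <;> simp [hgg] at hg ⊢
        rw [List.foldl_cons,
          show stepA (arr, temp, cnt, true) c = (arr, temp ++ [c], cnt + 1, true) by
            simp [stepA, hc, h3]]
        exact ih (cnt + 1) arr _ (by omega) hg'

theorem foldA_grab_some (cs : List Char) :
    ∀ (cnt k : Nat) (arr : List String) (temp : List Char), cnt < 3 → altGrab cs cnt = some k →
      List.foldl stepA (arr, temp, cnt, true) cs =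
        List.foldl stepA (arr ++ [String.mk (temp ++ cs.take k)], [], 0, false) (cs.drop k) := by
  induction cs with
  | nil => intro cnt k arr temp _ hg; simp [altGrab] at hg
  | cons c cs ih =>
    intro cnt k arr temp hcnt hg
    simp only [altGrab] at hg
    by_cases hc : c = 'D'
    · simp only [hc, if_true, if_neg (Nat.ne_of_lt hcnt)] at hg
      obtain ⟨k', hk', rfl⟩ : ∃ k', altGrab cs cnt = some k' ∧ k = k' + 1 := by
        cases hgg : altGrab cs cnt <;> simp [hgg] at hg
        exact ⟨_, rfl, hg.symm⟩
      rw [List.foldl_cons,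
        show stepA (arr, temp, cnt, true) c = (arr, temp ++ [c], cnt, true) by simp [stepA, hc],
        ih cnt k' arr _ hcnt hk']
      simp
    · simp only [hc, if_false] at hg
      by_cases h3 : cnt + 1 = 3
      · simp only [h3, if_true, Option.some_inj] at hg
        subst hg
        rw [List.foldl_cons,
          show stepA (arr, temp, cnt, true) c = (arr ++ [String.mk (temp ++ [c])], [], 0, false) by
            simp [stepA, hc, h3]]
        simp
      · simp only [h3, if_false] at hg
        obtain ⟨k', hk', rfl⟩ : ∃ k', altGrab cs (cnt + 1) = some k' ∧ k = k' + 1 := by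
          cases hgg : altGrab cs (cnt + 1) <;> simp [hgg] at hg
          exact ⟨_, rfl, hg.symm⟩
        rw [List.foldl_cons,
          show stepA (arr, temp, cnt, true) c = (arr, temp ++ [c], cnt + 1, true) by
            simp [stepA, hc, h3],
          ih (cnt + 1) k' arr _ (by omega) hk']
        simp

theorem mainAux : ∀ (n : Nat) (cs : List Char), cs.length ≤ n → ∀ (arr : List String),
    (List.foldl stepA (arr, [], 0, false) cs).1 = altLoop cs arr := by
  intro n
  induction n with
  | zero =>
    intro cs hlen arr
    have : cs = [] := List.length_eq_zero_iff.mp (Nat.le_zero.mp hlen)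
    subst this
    rw [altLoop]; simp
  | succ n ih =>
    intro cs hlen arr
    by_cases hD : 'D' ∈ cs
    · have hd : cs.idxOf 'D' < cs.length := List.idxOf_lt_length_of_mem hD
      set d := cs.idxOf 'D' with hd_def
      have hpre : 'D' ∉ cs.take d := by
        intro hmem
        have := (List.mem_take_iff_idxOf_lt hD).mp hmem
        omega
      have hgetD : cs[d] = 'D' := List.getElem_idxOf hd
      have hsplit : cs = cs.take d ++ 'D' :: cs.drop (d + 1) := by
        conv_lhs => rw [← List.take_append_drop d cs]
        rw [List.drop_eq_getElem_cons hd, hgetD]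
      have hlen_take : (cs.take d).length = d := List.length_take_of_le (Nat.le_of_lt hd)
      have hfold1 : List.foldl stepA (arr, [], 0, false) cs =
          List.foldl stepA (arr, cs.take d ++ ['D'], 0, true) (cs.drop (d + 1)) := by
        conv_lhs => rw [hsplit]
        rw [List.foldl_append, foldA_noD _ _ _ hpre]
        simp [List.foldl_cons, stepA]
      cases hg : altGrab (cs.drop (d + 1)) 0 with
      | none =>
        rw [hfold1, foldA_grab_none _ _ _ _ (by omega) hg]
        rw [altLoop]
        simp [hD, ← hd_def, hg]
      | some k =>
        have hdrop : (cs.drop (d + 1)).drop k = cs.drop (d + 1 + k) := by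
          rw [List.drop_drop]
        have htake : cs.take (d + 1 + k) = (cs.take d ++ ['D']) ++ (cs.drop (d + 1)).take k := by
          conv_lhs => rw [hsplit]
          rw [show cs.take d ++ 'D' :: cs.drop (d + 1) = (cs.take d ++ ['D']) ++ cs.drop (d + 1) by
            simp]
          rw [List.take_append,
            List.take_of_length_le (show ((cs.take d ++ ['D']).length ≤ d + 1 + k) by
              simp [hlen_take])]
          first | rfl | (congr 1; simp [hlen_take])
        rw [hfold1, foldA_grab_some _ _ _ _ _ (by omega) hg, hdrop,
          ih (cs.drop (d + 1 + k)) (by simp [List.length_drop]; omega)]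
        conv_rhs => rw [altLoop]
        simp [hD, ← hd_def, hg, htake]
    · rw [foldA_noD _ _ _ hD, altLoop]
      simp [hD]

theorem split_to_f_value_eq (line : String) :
    split_to_f_value line = split_to_f_value_alt line := by
  unfold split_to_f_value split_to_f_value_alt
  rw [foldl_copy]
  simp only [List.nil_append]
  exact mainAux line.toList.length line.toList (le_refl _) []

-- ===== VERDICT (by name: the statement is the Claim_ definition above) =====
theorem split_to_f_value_spec : Claim_equal_split_to_f_value := by
  intro line _
  unfold Spec_split_to_f_value
  exact split_to_f_value_eq line
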